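-- pv_equiv track=rewrite | github.com/Medis2025/dualloraenc_hpo | train_hpoid_span_contrastive.py | span_to_token_indices
-- ===== SOURCE A (Python) =====
-- from typing import List, Dict, Tuple, Optional
--
-- SPAN = Tuple[int, int]
--
-- def span_to_token_indices(
--     offsets: List[Tuple[int, int]],
--     span: SPAN,
--     fallback_to_whole: bool = True,
-- ) -> SPAN:
--     c0, c1 = span
--     token_indices = []
--     for ti, (a, b) in enumerate(offsets):
--         if a == b:
--             continue  # special tokens
--         # overlap check
--         if not (b <= c0 or a >= c1):
--             token_indices.append(ti)
--     if not token_indices: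
--         if fallback_to_whole:
--             # fallback: use all non-special tokens
--             valid = [ti for ti, (a, b) in enumerate(offsets) if a != b]
--             if not valid:
--                 return 0, 0
--             return valid[0], valid[-1]
--         else:
--             return 0, 0
--
--     if len(token_indices) == 1:
--         return token_indices[0], token_indices[0]
--     return token_indices[0], token_indices[-1]
-- ===== SOURCE B (Python) =====
-- def span_to_token_indices(offsets, span, fallback_to_whole=True):
--     c0, c1 = span
--     # forward scan: first non-special token overlapping the span
--     first = None
--     for i, (a, b) in enumerate(offsets):
--         if a != b and not (b <= c0 or a >= c1):
--             first = i
--             break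
--     if first is not None:
--         # backward scan: last overlapping non-special token
--         for j in range(len(offsets) - 1, -1, -1):
--             a, b = offsets[j]
--             if a != b and not (b <= c0 or a >= c1):
--                 return first, j
--     if fallback_to_whole:
--         f = None
--         for i, (a, b) in enumerate(offsets):
--             if a != b:
--                 f = i
--                 break
--         if f is not None:
--             for j in range(len(offsets) - 1, -1, -1):
--                 a, b = offsets[j]
--                 if a != b:
--                     return f, j
--     return 0, 0
-- ===== Notes on version B (the rewrite author's own statement) =====
-- stated objective: alternative
-- what changed: Replaces A's collection of the full list of overlapping token indices (and full fallback list) with early-exiting forward and backward endpoint scans that never materialise a list.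
import Mathlib
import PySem

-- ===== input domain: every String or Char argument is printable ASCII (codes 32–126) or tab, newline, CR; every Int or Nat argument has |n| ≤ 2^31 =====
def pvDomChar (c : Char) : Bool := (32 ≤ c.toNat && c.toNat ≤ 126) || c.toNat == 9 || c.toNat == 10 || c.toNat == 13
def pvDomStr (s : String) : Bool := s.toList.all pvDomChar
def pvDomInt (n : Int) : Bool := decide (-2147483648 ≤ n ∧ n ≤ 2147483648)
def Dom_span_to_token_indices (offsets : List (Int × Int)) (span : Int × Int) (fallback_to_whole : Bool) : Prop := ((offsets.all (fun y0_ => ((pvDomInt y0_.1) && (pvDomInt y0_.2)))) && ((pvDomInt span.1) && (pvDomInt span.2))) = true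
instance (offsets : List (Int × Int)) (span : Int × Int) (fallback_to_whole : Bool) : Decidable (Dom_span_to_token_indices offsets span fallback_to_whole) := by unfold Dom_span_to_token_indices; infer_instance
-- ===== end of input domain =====

-- B replaces A's materialised index lists by early-exiting forward/backward endpoint scans (alternative decomposition, O(1) extra space).

-- ===== PORT A =====
-- A's loop 'for ti,(a,b) in enumerate(offsets): if a==b: continue; if overlap: append ti'
def pvCollect (p : Int × Int → Bool) : List (Int × Int) → Int → List Int
  | [], _ => []
  | x :: xs, i => (if p x then [i] else []) ++ pvCollect p xs (i + 1)

def span_to_token_indices (offsets : List (Int × Int)) (span : Int × Int) (fallback_to_whole : Bool) : Int × Int :=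
  let c0 := span.1
  let c1 := span.2
  let token_indices := pvCollect (fun ab => !(ab.1 == ab.2) && !(decide (ab.2 ≤ c0) || decide (ab.1 ≥ c1))) offsets 0
  match token_indices with
  | [] =>
    if fallback_to_whole then
      match h : pvCollect (fun ab => !(ab.1 == ab.2)) offsets 0 with
      | [] => (0, 0)
      | v :: vs => (v, (v :: vs).getLast (by simp))
    else (0, 0)
  | t :: ts =>
    if ts.isEmpty then (t, t)
    else (t, (t :: ts).getLast (by simp))

-- ===== PORT B =====
-- forward scan with early exit: first index whose token satisfies p
def pvScanFirst (p : Int × Int → Bool) : List (Int × Int) → Int → Option Int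
  | [], _ => none
  | x :: xs, i => if p x then some i else pvScanFirst p xs (i + 1)

-- back-to-front scan: last index whose token satisfies p
def pvScanLast (p : Int × Int → Bool) : List (Int × Int) → Int → Option Int
  | [], _ => none
  | x :: xs, i =>
    match pvScanLast p xs (i + 1) with
    | some j => some j
    | none => if p x then some i else none

def span_to_token_indices_alt (offsets : List (Int × Int)) (span : Int × Int) (fallback_to_whole : Bool) : Int × Int :=
  let c0 := span.1
  let c1 := span.2
  let hit := fun (ab : Int × Int) => !(ab.1 == ab.2) && !(decide (ab.2 ≤ c0) || decide (ab.1 ≥ c1))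
  let r1 : Option (Int × Int) :=
    match pvScanFirst hit offsets 0 with
    | some first => (pvScanLast hit offsets 0).map (fun j => (first, j))
    | none => none
  match r1 with
  | some r => r
  | none =>
    if fallback_to_whole then
      match pvScanFirst (fun (ab : Int × Int) => !(ab.1 == ab.2)) offsets 0 with
      | some f =>
        match pvScanLast (fun (ab : Int × Int) => !(ab.1 == ab.2)) offsets 0 with
        | some j => (f, j)
        | none => (0, 0)
      | none => (0, 0)
    else (0, 0)

-- ===== PRECONDITION & SPEC =====
def Spec_span_to_token_indices (offsets : List (Int × Int)) (span : Int × Int) (fallback_to_whole : Bool) (out : Int × Int) : Prop := out = span_to_token_indices_alt offsets span fallback_to_whole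
instance (offsets : List (Int × Int)) (span : Int × Int) (fallback_to_whole : Bool) (out : Int × Int) : Decidable (Spec_span_to_token_indices offsets span fallback_to_whole out) := by unfold Spec_span_to_token_indices; infer_instance

-- ===== CLAIM (what is proved, stated in full; the proofs are below) =====
def Claim_equal_span_to_token_indices : Prop := ∀ (offsets : List (Int × Int)) (span : Int × Int) (fallback_to_whole : Bool), Dom_span_to_token_indices offsets span fallback_to_whole → Spec_span_to_token_indices offsets span fallback_to_whole (span_to_token_indices offsets span fallback_to_whole)

-- ===== LEMMAS AND PROOFS =====
theorem pvScanFirst_eq_head? (p : Int × Int → Bool) (xs : List (Int × Int)) (i : Int) :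
    pvScanFirst p xs i = (pvCollect p xs i).head? := by
  induction xs generalizing i with
  | nil => rfl
  | cons x xs ih =>
    simp only [pvScanFirst, pvCollect]
    by_cases h : p x <;> simp [h, ih]

theorem pvScanLast_eq_getLast? (p : Int × Int → Bool) (xs : List (Int × Int)) (i : Int) :
    pvScanLast p xs i = (pvCollect p xs i).getLast? := by
  induction xs generalizing i with
  | nil => rfl
  | cons x xs ih =>
    simp only [pvScanLast, pvCollect, ih]
    by_cases h : p x <;>
      cases hc : (pvCollect p xs (i + 1)).getLast? <;>
      simp_all [List.getLast?_cons]

-- ===== VERDICT (by name: the statement is the Claim_ definition above) =====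
theorem span_to_token_indices_spec : Claim_equal_span_to_token_indices := by
  intro offsets span fb _
  unfold Spec_span_to_token_indices span_to_token_indices span_to_token_indices_alt
  simp only [pvScanFirst_eq_head?, pvScanLast_eq_getLast?]
  cases h : pvCollect (fun ab => !(ab.1 == ab.2) && !(decide (ab.2 ≤ span.1) || decide (ab.1 ≥ span.2))) offsets 0 with
  | cons t ts =>
    simp only [List.head?_cons, List.getLast?_eq_some_getLast (List.cons_ne_nil t ts)]
    cases ts with
    | nil => simp
    | cons u us => simp
  | nil =>
    simp only [List.head?_nil]
    cases hv : pvCollect (fun ab => !(ab.1 == ab.2)) offsets 0 with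
    | nil => simp
    | cons v vs =>
      simp [List.getLast?_eq_some_getLast (List.cons_ne_nil v vs)]
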